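-- pv_equiv track=rewrite | github.com/guillermolam/DeepJudgeStreamingJsonBenchmark | src/serializers/pickle_binary_mono_parser.py | _find_closing_quote
-- ===== SOURCE A (Python) =====
-- class CharacterProcessor:
--     """Pure functions for character processing."""
--
--     @staticmethod
--     def is_escape_char(char: str) -> bool:
--         """Check if character is an escape character."""
--         return char == '\\'
--
--     @staticmethod
--     def is_quote_char(char: str) -> bool:
--         """Check if character is a quote."""
--         return char == '"'
--
--     @staticmethod
--     def is_open_brace(char: str) -> bool:
--         """Check if character is an opening brace."""
--         return char == '{'
--
--     @staticmethod
--     def is_close_brace(char: str) -> bool: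
--         """Check if character is a closing brace."""
--         return char == '}'
--
-- def _find_closing_quote(json_str: str) -> int:
--     """Find the closing quote position."""
--     escape_next = False
--
--     for i in range(1, len(json_str)):
--         char = json_str[i]
--
--         if escape_next:
--             escape_next = False
--             continue
--
--         if CharacterProcessor.is_escape_char(char):
--             escape_next = True
--             continue
--
--         if CharacterProcessor.is_quote_char(char):
--             return i
--
--     return -1
-- ===== SOURCE B (Python) =====
-- def _find_closing_quote(json_str: str) -> int:
--     """Find the closing quote position by jumping between quote candidates."""
--     start = 1
--     while True:
--         p = json_str.find('"', start)
--         if p == -1: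
--             return -1
--         k = p - 1
--         while k >= 1 and json_str[k] == '\\':
--             k -= 1
--         if (p - 1 - k) % 2 == 0:
--             return p
--         start = p + 1
-- ===== Notes on version B (the rewrite author's own statement) =====
-- stated objective: faster
-- what changed: Replaces A's per-character Python loop with an escape flag by repeated str.find jumps to the next quote candidate, accepting a candidate iff the run of consecutive backslashes immediately before it (stopping at index 1) has even length.
import Mathlib
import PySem

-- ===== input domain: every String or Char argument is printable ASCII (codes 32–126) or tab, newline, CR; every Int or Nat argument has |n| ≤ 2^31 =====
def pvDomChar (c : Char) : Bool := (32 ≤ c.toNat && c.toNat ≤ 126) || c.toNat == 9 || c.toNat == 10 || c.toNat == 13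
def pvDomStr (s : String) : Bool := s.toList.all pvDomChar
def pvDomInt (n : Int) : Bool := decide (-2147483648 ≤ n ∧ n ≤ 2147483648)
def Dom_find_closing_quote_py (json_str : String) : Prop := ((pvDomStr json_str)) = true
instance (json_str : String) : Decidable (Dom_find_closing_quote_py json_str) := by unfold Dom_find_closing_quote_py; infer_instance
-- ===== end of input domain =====

-- B hops between quote candidates via find + backslash-parity instead of A's per-character escape-flag scan (alternative algorithm; return value only).


-- ===== PORT A =====
-- A's loop: for i in range(1, len(json_str)) over json_str[i] with an escape flag.
def pvLoopA : List Char → Nat → Bool → Int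
  | [], _, _ => -1
  | c :: rest, i, esc =>
    if esc then pvLoopA rest (i + 1) false
    else if c = '\\' then pvLoopA rest (i + 1) true
    else if c = '"' then (i : Int)
    else pvLoopA rest (i + 1) false

def find_closing_quote_py (json_str : String) : Int :=
  pvLoopA (json_str.toList.drop 1) 1 false

-- ===== PORT B =====
-- json_str.find('"', start): index of the first '"' at position ≥ start, none if absent.
def pvFindQAux : List Char → Nat → Option Nat
  | [], _ => none
  | c :: rest, i => if c = '"' then some i else pvFindQAux rest (i + 1)

def pvFindQ (cs : List Char) (start : Nat) : Option Nat :=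
  pvFindQAux (cs.drop start) start

-- the inner while loop of B: number of consecutive '\' at indices k, k-1, …, stopping before index 0
def pvCountBS (cs : List Char) : Nat → Nat
  | 0 => 0
  | k + 1 => if cs.getD (k + 1) ' ' = '\\' then pvCountBS cs k + 1 else 0

-- the outer `while True` loop of B (fuel only makes it total; it is never exhausted on reachable inputs)
def pvLoopB (cs : List Char) : Nat → Nat → Int
  | 0, _ => -1
  | fuel + 1, start =>
    match pvFindQ cs start with
    | none => -1
    | some p => if pvCountBS cs (p - 1) % 2 = 0 then (p : Int) else pvLoopB cs fuel (p + 1)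

def find_closing_quote_py_alt (json_str : String) : Int :=
  pvLoopB json_str.toList json_str.toList.length 1

-- ===== PRECONDITION & SPEC =====
def Spec_find_closing_quote_py (json_str : String) (out : Int) : Prop := out = find_closing_quote_py_alt json_str
instance (json_str : String) (out : Int) : Decidable (Spec_find_closing_quote_py json_str out) := by unfold Spec_find_closing_quote_py; infer_instance

-- ===== CLAIM (what is proved, stated in full; the proofs are below) =====
def Claim_equal_find_closing_quote_py : Prop := ∀ (json_str : String), Dom_find_closing_quote_py json_str → Spec_find_closing_quote_py json_str (find_closing_quote_py json_str)

-- ===== LEMMAS AND PROOFS =====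

-- A's escape flag after processing a block of characters
def pvEscAfter : Bool → List Char → Bool
  | esc, [] => esc
  | esc, c :: rest => pvEscAfter (if esc then false else c = '\\') rest

theorem pvLoopA_no_quote (l : List Char) (i : Nat) (esc : Bool)
    (h : '"' ∉ l) : pvLoopA l i esc = -1 := by
  induction l generalizing i esc with
  | nil => rfl
  | cons c rest ih =>
    have hc : c ≠ '"' := fun hc => h (hc ▸ List.mem_cons_self)
    have hr : '"' ∉ rest := fun hm => h (List.mem_cons_of_mem _ hm)
    cases esc with
    | true => simpa only [pvLoopA, if_pos] using ih (i + 1) false hr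
    | false =>
      by_cases hb : c = '\\'
      · simp only [pvLoopA, hb, if_neg Bool.false_ne_true, if_pos]
        exact ih (i + 1) true hr
      · simp only [pvLoopA, if_neg Bool.false_ne_true, if_neg hb, if_neg hc]
        exact ih (i + 1) false hr

theorem pvLoopA_scan (R rest : List Char) (i : Nat) (esc : Bool)
    (h : '"' ∉ R) :
    pvLoopA (R ++ rest) i esc = pvLoopA rest (i + R.length) (pvEscAfter esc R) := by
  induction R generalizing i esc with
  | nil => simp [pvEscAfter]
  | cons c Rt ih =>
    have hc : c ≠ '"' := fun hc => h (hc ▸ List.mem_cons_self)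
    have hr : '"' ∉ Rt := fun hm => h (List.mem_cons_of_mem _ hm)
    have harith : i + 1 + Rt.length = i + (c :: Rt).length := by simp; omega
    cases esc with
    | true =>
      simp only [List.cons_append, pvLoopA, if_pos, pvEscAfter]
      rw [ih _ _ hr, harith]
    | false =>
      by_cases hb : c = '\\'
      · simp only [List.cons_append, pvLoopA, hb, if_neg Bool.false_ne_true, if_pos, pvEscAfter]
        rw [ih _ _ hr, harith]
        simp [hb]
      · simp only [List.cons_append, pvLoopA, if_neg Bool.false_ne_true, if_neg hb, if_neg hc,
          pvEscAfter]
        rw [ih _ _ hr, harith]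
        simp [hb]

-- facts about pvFindQ
theorem pvFindQAux_some (l : List Char) (i p : Nat)
    (h : pvFindQAux l i = some p) :
    i ≤ p ∧ p - i < l.length ∧ l.getD (p - i) ' ' = '"' ∧
      ∀ j, j < p - i → l.getD j ' ' ≠ '"' := by
  induction l generalizing i with
  | nil => simp [pvFindQAux] at h
  | cons c rest ih =>
    unfold pvFindQAux at h
    by_cases hc : c = '"'
    · rw [if_pos hc] at h
      have : p = i := (Option.some_inj.mp h).symm
      subst this
      refine ⟨le_refl _, by simp, by simpa, fun j hj => by omega⟩
    · rw [if_neg hc] at h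
      obtain ⟨h1, h2, h3, h4⟩ := ih (i + 1) h
      have hpi : 0 < p - i := by omega
      refine ⟨by omega, by simp; omega, ?_, ?_⟩
      · have : p - i = (p - (i+1)) + 1 := by omega
        rw [this]; simpa using h3
      · intro j hj
        match j with
        | 0 => simpa using hc
        | j + 1 =>
          have := h4 j (by omega)
          simpa using this

theorem pvFindQAux_none (l : List Char) (i : Nat)
    (h : pvFindQAux l i = none) : '"' ∉ l := by
  induction l generalizing i with
  | nil => simp
  | cons c rest ih =>
    unfold pvFindQAux at h
    by_cases hc : c = '"'
    · rw [if_pos hc] at h; exact absurd h (by simp)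
    · rw [if_neg hc] at h
      intro hm
      rcases List.mem_cons.mp hm with h1 | h2
      · exact hc h1.symm
      · exact ih _ h h2

theorem pvFindQ_some (cs : List Char) (start p : Nat)
    (h : pvFindQ cs start = some p) :
    start ≤ p ∧ p < cs.length ∧ cs.getD p ' ' = '"' ∧
      ∀ j, start ≤ j → j < p → cs.getD j ' ' ≠ '"' := by
  obtain ⟨h1, h2, h3, h4⟩ := pvFindQAux_some _ _ _ h
  have hl : (cs.drop start).length = cs.length - start := by simp
  have hlen : p < cs.length := by omega
  have hd : ∀ j, start ≤ j → j < cs.length →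
      (cs.drop start).getD (j - start) ' ' = cs.getD j ' ' := by
    intro j hj hjl
    rw [List.getD_eq_getElem?_getD, List.getD_eq_getElem?_getD, List.getElem?_drop]
    have he : start + (j - start) = j := by omega
    rw [he]
  refine ⟨h1, hlen, ?_, ?_⟩
  · rw [← hd p h1 hlen]; exact h3
  · intro j hj hjp
    rw [← hd j hj (by omega)]
    exact h4 (j - start) (by omega)

-- escape flag from start (with esc = false) equals the backslash-run parity B counts
theorem pvEsc_parity (cs : List Char) (start : Nat)
    (hs : 1 ≤ start)
    (hb : start = 1 ∨ cs.getD (start - 1) ' ' ≠ '\\') :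
    ∀ d, start + d ≤ cs.length →
      pvEscAfter false ((cs.drop start).take d) =
        decide (pvCountBS cs (start + d - 1) % 2 = 1) := by
  intro d
  induction d with
  | zero =>
    intro _
    simp only [List.take_zero, pvEscAfter, Nat.add_zero]
    have h0 : pvCountBS cs (start - 1) = 0 := by
      rcases hb with hb | hb
      · subst hb; simp [pvCountBS]
      · have h1 : 1 ≤ start - 1 ∨ start - 1 = 0 := by omega
        rcases h1 with h1 | h1
        · match hk : start - 1, h1 with
          | k + 1, _ =>
            rw [hk] at hb
            simp only [pvCountBS]
            rw [if_neg hb]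
        · rw [h1]; simp [pvCountBS]
    simp [h0]
  | succ d ih =>
    intro hdl
    have hjl : start + d < cs.length := by omega
    have hseg : (cs.drop start).take (d + 1) =
        (cs.drop start).take d ++ [cs.getD (start + d) ' '] := by
      rw [List.take_add_one]
      congr 1
      have hidx : (cs.drop start)[d]? = some (cs.getD (start + d) ' ') := by
        rw [List.getElem?_drop, List.getElem?_eq_getElem hjl]
        simp [List.getD_eq_getElem?_getD, List.getElem?_eq_getElem hjl]
      simp [hidx]
    rw [hseg]
    have happ : ∀ (e : Bool) (l : List Char) (c : Char),
        pvEscAfter e (l ++ [c]) = (if pvEscAfter e l then false else decide (c = '\\')) := by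
      intro e l c
      induction l generalizing e with
      | nil => simp [pvEscAfter]
      | cons dd t iht => simp only [List.cons_append, pvEscAfter]; exact iht _
    rw [happ, ih (by omega)]
    have hk : start + (d + 1) - 1 = (start + d - 1) + 1 := by omega
    have hk2 : start + d = (start + d - 1) + 1 := by omega
    rw [hk]
    by_cases hbs : cs.getD ((start + d - 1) + 1) ' ' = '\\'
    · rw [← hk2] at hbs
      simp only [pvCountBS, ← hk2, hbs, if_pos]
      rcases Nat.even_or_odd (pvCountBS cs (start + d - 1)) with he | ho
      · have h1 : pvCountBS cs (start + d - 1) % 2 = 0 := Nat.even_iff.mp he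
        have h2 : (pvCountBS cs (start + d - 1) + 1) % 2 = 1 := by omega
        simp [h1, h2]
      · have h1 : pvCountBS cs (start + d - 1) % 2 = 1 := Nat.odd_iff.mp ho
        have h2 : (pvCountBS cs (start + d - 1) + 1) % 2 = 0 := by omega
        simp [h1, h2]
    · rw [← hk2] at hbs
      simp only [pvCountBS, ← hk2]
      rw [if_neg hbs]
      have hbs' : ¬(cs[start + d]?.getD ' ' = '\\') := by
        simpa [List.getD_eq_getElem?_getD] using hbs
      simp [hbs']

-- main loop correspondence
theorem pvMain (cs : List Char) (fuel : Nat) :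
    ∀ start, 1 ≤ start → cs.length ≤ start + fuel →
    (start = 1 ∨ cs.getD (start - 1) ' ' ≠ '\\') →
    pvLoopA (cs.drop start) start false = pvLoopB cs fuel start := by
  induction fuel with
  | zero =>
    intro start hs hf hb
    have hd : cs.drop start = [] := List.drop_eq_nil_of_le (by omega)
    show pvLoopA (cs.drop start) start false = (-1 : Int)
    rw [hd]; rfl
  | succ fuel ih =>
    intro start hs hf hb
    unfold pvLoopB
    match hF : pvFindQ cs start with
    | none =>
      have := pvFindQAux_none _ _ hF
      simp only
      exact pvLoopA_no_quote _ _ _ this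
    | some p =>
      obtain ⟨h1, h2, h3, h4⟩ := pvFindQ_some _ _ _ hF
      -- split drop start = take (p-start) ++ drop p
      have hsplit : cs.drop start = (cs.drop start).take (p - start) ++ cs.drop p := by
        conv_lhs => rw [← List.take_append_drop (p - start) (cs.drop start)]
        rw [List.drop_drop]
        congr 2
        omega
      have hnq : '"' ∉ (cs.drop start).take (p - start) := by
        intro hm
        obtain ⟨idx, hidx, hval⟩ := List.mem_iff_getElem.mp hm
        have hidx' : idx < p - start := by
          have := hidx
          simp at this; omega
        have : cs.getD (start + idx) ' ' = '"' := by
          rw [List.getD_eq_getElem?_getD]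
          have : cs[start + idx]? = some '"' := by
            have h5 : ((cs.drop start).take (p - start))[idx]? = some '"' := by
              rw [List.getElem?_eq_getElem hidx]; simp [hval]
            rw [List.getElem?_take] at h5
            rw [List.getElem?_drop] at h5
            simp [hidx'] at h5
            exact h5
          simp [this]
        exact h4 _ (by omega) (by omega) this
      rw [hsplit, pvLoopA_scan _ _ _ _ hnq]
      have hlen : ((cs.drop start).take (p - start)).length = p - start := by
        simp; omega
      rw [hlen]
      have hip : start + (p - start) = p := by omega
      rw [hip]
      have hdp : cs.drop p = '"' :: cs.drop (p + 1) := by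
        have hget : cs[p] = '"' := by
          rw [List.getD_eq_getElem?_getD, List.getElem?_eq_getElem h2] at h3
          simpa using h3
        rw [List.drop_eq_getElem_cons h2, hget]
      have hpar' := pvEsc_parity cs start hs hb (p - start) (by omega)
      have hps : start + (p - start) = p := by omega
      rw [hps] at hpar'
      rw [hpar']
      by_cases hpar : pvCountBS cs (p - 1) % 2 = 0
      · have : ¬ (pvCountBS cs (p - 1) % 2 = 1) := by omega
        simp only [this, decide_false]
        rw [hdp]
        unfold pvLoopA
        simp [hpar]
      · have hodd : pvCountBS cs (p - 1) % 2 = 1 := by omega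
        simp only [hodd, decide_true]
        rw [hdp]
        unfold pvLoopA
        simp only [if_neg hpar]
        have hq : ¬(cs.getD (p + 1 - 1) ' ' = '\\') := by
          simp only [Nat.add_sub_cancel, h3]
          decide
        exact ih (p + 1) (by omega) (by omega) (Or.inr hq)

-- ===== VERDICT (by name: the statement is the Claim_ definition above) =====
theorem find_closing_quote_py_spec : Claim_equal_find_closing_quote_py := by
  intro s _
  unfold Spec_find_closing_quote_py find_closing_quote_py find_closing_quote_py_alt
  exact pvMain s.toList s.toList.length 1 (le_refl _) (by omega) (Or.inl rfl)
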